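-- pv_equiv track=rewrite | github.com/ankitsumitg/python-projects | dnaSequence/dnaSequencing.py | findLargestOverlap
-- ===== SOURCE A (Python) =====
-- def strandsAreNotEmpty(s1,s2):
--     return False if s1 =='' or s2 == '' else True
--
-- def strandsAreEqualLengths(s1,s2):
--     return len(s1) == len(s2)
--
-- def candidateOverlapsTarget(t,c,overlap):
--     k = overlap
--     for i in range(overlap):
--         if t[-k] !=  c[i]:
--             return False
--         k -= 1
--     return True
--
-- def findLargestOverlap(t,c):
--     if strandsAreEqualLengths(t,c) and strandsAreNotEmpty(t,c):
--         l_overlap = 0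
--         for i in range(len(c)):
--             if candidateOverlapsTarget(t,c,i+1):
--                 l_overlap = i + 1
--         return l_overlap
--     return -1
-- ===== SOURCE B (Python) =====
-- def findLargestOverlap(t, c):
--     n = len(t)
--     if n != len(c) or n == 0:
--         return -1
--     s = c + "\x00" + t
--     pi = [0] * len(s)
--     k = 0
--     for i in range(1, len(s)):
--         while k > 0 and s[i] != s[k]:
--             k = pi[k - 1]
--         if s[i] == s[k]:
--             k += 1
--         pi[i] = k
--     return k
-- ===== Notes on version B (the rewrite author's own statement) =====
-- stated objective: faster
-- what changed: A tests every candidate overlap length 1..n with a per-character suffix/prefix comparison (quadratic); B builds the KMP prefix function of c + '\x00' + t in one linear pass and reads the answer off the final automaton state, never comparing substrings directly.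
import Mathlib
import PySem

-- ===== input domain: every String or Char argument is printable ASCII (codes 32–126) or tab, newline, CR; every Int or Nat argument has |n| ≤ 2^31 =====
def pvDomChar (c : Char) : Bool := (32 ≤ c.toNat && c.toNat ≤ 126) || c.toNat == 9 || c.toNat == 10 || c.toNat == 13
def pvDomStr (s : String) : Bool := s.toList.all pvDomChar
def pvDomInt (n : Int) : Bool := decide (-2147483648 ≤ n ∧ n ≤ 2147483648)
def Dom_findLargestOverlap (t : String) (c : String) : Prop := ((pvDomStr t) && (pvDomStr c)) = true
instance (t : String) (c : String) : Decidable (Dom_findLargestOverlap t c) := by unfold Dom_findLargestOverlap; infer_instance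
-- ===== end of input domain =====

-- B replaces A's quadratic try-every-overlap scan by one linear KMP prefix-function
-- pass over c + '\x00' + t (objective: faster, asymptotic).

-- ===== PORT A =====
-- string equality with '' is checked on the character list (exact)
def strandsAreNotEmpty (s1 : String) (s2 : String) : Bool :=
  if s1.toList = [] ∨ s2.toList = [] then false else true

def strandsAreEqualLengths (s1 : String) (s2 : String) : Bool :=
  decide (PySem.Str.len s1 = PySem.Str.len s2)

-- the 'for i in range(overlap)' loop of candidateOverlapsTarget, carrying k;
-- the 'none' case is Python's IndexError, unreachable in A's calls
def candLoop (t : String) (c : String) (k : Int) (is : List Int) : Bool :=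
  match is with
  | [] => true
  | i :: rest =>
    match PySem.Str.pyGet? t (-k), PySem.Str.pyGet? c i with
    | some a, some b => if a ≠ b then false else candLoop t c (k - 1) rest
    | _, _ => false

def candidateOverlapsTarget (t : String) (c : String) (overlap : Int) : Bool :=
  candLoop t c overlap (PySem.List.pyRange 0 overlap 1)

def findLargestOverlap (t : String) (c : String) : Int :=
  if strandsAreEqualLengths t c && strandsAreNotEmpty t c then
    (PySem.List.pyRange 0 (PySem.Str.len c) 1).foldl
      (fun l_overlap i => if candidateOverlapsTarget t c (i + 1) then i + 1 else l_overlap) 0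
  else -1

-- ===== PORT B =====
-- the separator character '\x00' of Source B
def pvSep : Char := Char.ofNat 0

-- the 'while k > 0 and s[i] != s[k]: k = pi[k-1]' loop of Source B; the fuel only makes
-- the recursion total, s.length steps always suffice (k strictly decreases)
def kmpWhile (s : List Char) (pi : List Nat) (x : Char) : Nat → Nat → Nat
  | 0, k => k
  | fuel+1, k =>
    if 0 < k ∧ ¬ x = s.getD k pvSep then kmpWhile s pi x fuel (pi.getD (k-1) 0)
    else k

-- the 'for i in range(1, len(s))' loop of Source B, state = (pi so far, k);
-- pi is built left to right, getD's default 0 is Python's preallocated 0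
def kmpLoop (s : List Char) : List Nat × Nat :=
  (List.range' 1 (s.length - 1)).foldl
    (fun st i =>
      let x := s.getD i pvSep
      let k1 := kmpWhile s st.1 x s.length st.2
      let k2 := if x = s.getD k1 pvSep then k1 + 1 else k1
      (st.1 ++ [k2], k2))
    ([0], 0)

def findLargestOverlap_alt (t : String) (c : String) : Int :=
  let n := PySem.Str.len t
  if n ≠ PySem.Str.len c ∨ n = 0 then -1
  else ((kmpLoop (c.toList ++ pvSep :: t.toList)).2 : Nat)

-- ===== PRECONDITION & SPEC =====
def Spec_findLargestOverlap (t : String) (c : String) (out : Int) : Prop := out = findLargestOverlap_alt t c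
instance (t : String) (c : String) (out : Int) : Decidable (Spec_findLargestOverlap t c out) := by unfold Spec_findLargestOverlap; infer_instance

-- ===== CLAIM (what is proved, stated in full; the proofs are below) =====
def Claim_equal_findLargestOverlap : Prop := ∀ (t : String) (c : String), Dom_findLargestOverlap t c → Spec_findLargestOverlap t c (findLargestOverlap t c)

-- ===== LEMMAS AND PROOFS =====

-- k is (the length of) a border of s: a proper prefix that is also a suffix
def isBrdB (s : List Char) (k : Nat) : Bool := decide (k < s.length ∧ s.take k <:+ s)

-- longest proper border length
def lbp (s : List Char) : Nat := Nat.findGreatest (fun k => isBrdB s k = true) (s.length - 1)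

lemma isBrdB_zero (s : List Char) (h : s ≠ []) : isBrdB s 0 = true := by
  simp [isBrdB, List.suffix_iff_eq_drop]
  exact List.length_pos_iff.mpr h

lemma lbp_isBrd (s : List Char) (h : s ≠ []) : isBrdB s (lbp s) = true := by
  unfold lbp
  exact Nat.findGreatest_spec (P := fun k => isBrdB s k = true) (Nat.zero_le _) (isBrdB_zero s h)

lemma lbp_lt (s : List Char) (h : s ≠ []) : lbp s < s.length := by
  have := lbp_isBrd s h
  simp [isBrdB] at this
  exact this.1

lemma lbp_greatest (s : List Char) (k : Nat) (h : isBrdB s k = true) : k ≤ lbp s := by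
  have hk : k < s.length := by simp [isBrdB] at h; exact h.1
  unfold lbp
  exact Nat.le_findGreatest (P := fun k => isBrdB s k = true) (by omega) h

lemma lbp_eq_of (s : List Char) (m : Nat) (h1 : isBrdB s m = true)
    (h2 : ∀ k, isBrdB s k = true → k ≤ m) : lbp s = m := by
  have hne : s ≠ [] := by
    have : m < s.length := by simp [isBrdB] at h1; exact h1.1
    exact List.ne_nil_of_length_pos (by omega)
  exact Nat.le_antisymm (h2 _ (lbp_isBrd s hne)) (lbp_greatest s m h1)

lemma brd_up (s : List Char) (k j : Nat) (hk : isBrdB s k = true)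
    (hj : isBrdB (s.take k) j = true) : isBrdB s j = true := by
  simp only [isBrdB, decide_eq_true_eq] at *
  obtain ⟨hk1, hk2⟩ := hk
  obtain ⟨hj1, hj2⟩ := hj
  rw [List.length_take] at hj1
  have hjk : j < k := lt_of_lt_of_le hj1 (min_le_left _ _)
  constructor
  · omega
  · rw [List.take_take] at hj2
    rw [show min j k = j by omega] at hj2
    exact hj2.trans hk2

lemma brd_down (s : List Char) (k j : Nat) (hk : isBrdB s k = true)
    (hj : isBrdB s j = true) (hjk : j < k) : isBrdB (s.take k) j = true := by
  simp only [isBrdB, decide_eq_true_eq] at *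
  obtain ⟨hk1, hk2⟩ := hk
  obtain ⟨hj1, hj2⟩ := hj
  have hlt : (s.take k).length = k := by rw [List.length_take]; omega
  refine ⟨by omega, ?_⟩
  rw [List.take_take, show min j k = j by omega]
  have e2 : s.take k = s.drop (s.length - k) := by
    rw [List.suffix_iff_eq_drop] at hk2
    rw [hk2, List.length_take]; congr 1; omega
  have e1 : s.take j = s.drop (s.length - j) := by
    rw [List.suffix_iff_eq_drop] at hj2
    rw [hj2, List.length_take]; congr 1; omega
  have : s.take j = (s.take k).drop (k - j) := by
    rw [e2, List.drop_drop, e1]; congr 1; omega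
  rw [this]
  exact List.drop_suffix _ _

-- extension: borders of l ++ [x] of positive length are extended borders of l
lemma brd_ext (l : List Char) (x : Char) (K : Nat) :
    isBrdB (l ++ [x]) (K + 1) = true ↔ (isBrdB l K = true ∧ l[K]? = some x) := by
  simp only [isBrdB, decide_eq_true_eq, List.length_append, List.length_singleton]
  constructor
  · rintro ⟨h1, h2⟩
    have hK : K < l.length := by omega
    rw [List.suffix_iff_eq_drop] at h2
    rw [List.length_take, List.length_append] at h2
    rw [show min (K+1) (l.length + [x].length) = K + 1 by simp only [List.length_singleton]; omega] at h2
    rw [List.take_append_of_le_length (by omega)] at h2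
    rw [List.drop_append_of_le_length (by simp only [List.length_singleton]; omega)] at h2
    rw [List.take_add_one, List.getElem?_eq_getElem hK] at h2
    simp only [Option.toList_some] at h2
    rw [show l.length + [x].length - (K+1) = l.length - K by simp only [List.length_singleton]; omega] at h2
    have hlen : (l.drop (l.length - K)).length = K := by rw [List.length_drop]; omega
    have h3 := List.append_inj h2 (by rw [List.length_take]; omega)
    refine ⟨⟨hK, ?_⟩, ?_⟩
    · rw [List.suffix_iff_eq_drop, List.length_take, show min K l.length = K by omega]
      exact h3.1
    · rw [List.getElem?_eq_getElem hK]
      exact congrArg some (List.singleton_injective h3.2)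
  · rintro ⟨⟨hK, h2⟩, h3⟩
    refine ⟨by omega, ?_⟩
    rw [List.suffix_iff_eq_drop] at h2 ⊢
    rw [List.length_take, List.length_append, List.length_singleton,
        show min (K+1) (l.length + 1) = K + 1 by omega]
    rw [List.take_append_of_le_length (by omega)]
    rw [List.drop_append_of_le_length (by omega)]
    rw [List.take_add_one, List.getElem?_eq_getElem hK]
    rw [List.length_take, show min K l.length = K by omega] at h2
    rw [List.getElem?_eq_getElem hK] at h3
    simp only [Option.toList_some]
    rw [show l.length + 1 - (K+1) = l.length - K by omega, ← h2]
    congr 1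
    simp only [Option.some.injEq] at h3
    rw [h3]

-- real statement of the while-loop lemma (l := s.take i)
lemma kmpWhile_run (s : List Char) (pi : List Nat) (x : Char) (i : Nat)
    (hi : i ≤ s.length)
    (Hpi : ∀ m, m < i → pi.getD m 0 = lbp (s.take (m+1))) :
    ∀ fuel k, k < fuel →
      isBrdB (s.take i) k = true →
      (∀ j, isBrdB (s.take i) j = true → (s.take i)[j]? = some x → j ≤ k) →
      (isBrdB (s.take i) (kmpWhile s pi x fuel k) = true ∧
       (∀ j, isBrdB (s.take i) j = true → (s.take i)[j]? = some x →
          j ≤ kmpWhile s pi x fuel k) ∧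
       (¬ (s.take i)[kmpWhile s pi x fuel k]? = some x → kmpWhile s pi x fuel k = 0)) := by
  have hil : (s.take i).length = i := by rw [List.length_take]; omega
  have hget : ∀ j, j < i → (s.take i)[j]? = some (s.getD j pvSep) := by
    intro j hj
    rw [List.getElem?_take, if_pos hj, List.getD_eq_getElem?_getD,
        List.getElem?_eq_getElem (by omega)]
    rfl
  intro fuel
  induction fuel with
  | zero => intro k hk; omega
  | succ fuel ih =>
    intro k hk hbrd hmax
    rw [kmpWhile]
    by_cases hc : 0 < k ∧ ¬ x = s.getD k pvSep
    · rw [if_pos hc]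
      have hki : k < i := by
        have h' := hbrd
        rw [isBrdB, decide_eq_true_eq, hil] at h'
        exact h'.1
      have hpik : pi.getD (k-1) 0 = lbp (s.take k) := by
        have := Hpi (k-1) (by omega)
        rwa [show k-1+1 = k by omega] at this
      have htk : (s.take i).take k = s.take k := by
        rw [List.take_take]; congr 1; omega
      have hkne : s.take k ≠ [] := by
        apply List.ne_nil_of_length_pos
        rw [List.length_take]; omega
      have hlt2 : lbp (s.take k) < k := by
        have := lbp_lt (s.take k) hkne
        rw [List.length_take] at this
        omega
      have hb2 : isBrdB (s.take i) (lbp (s.take k)) = true := by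
        apply brd_up (s.take i) k _ hbrd
        rw [htk]
        exact lbp_isBrd _ hkne
      have hmax2 : ∀ j, isBrdB (s.take i) j = true → (s.take i)[j]? = some x →
          j ≤ pi.getD (k-1) 0 := by
        intro j hj hjx
        have hjk : j ≤ k := hmax j hj hjx
        have hjne : j ≠ k := by
          intro hEq
          subst hEq
          rw [hget j hki] at hjx
          exact hc.2 (Option.some.injEq _ _ ▸ hjx).symm
        have : isBrdB ((s.take i).take k) j = true := brd_down _ _ _ hbrd hj (by omega)
        rw [htk] at this
        rw [hpik]
        exact lbp_greatest _ _ this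
      rw [hpik] at hmax2 ⊢
      exact ih (lbp (s.take k)) (by omega) hb2 hmax2
    · rw [if_neg hc]
      refine ⟨hbrd, hmax, ?_⟩
      intro hnx
      by_contra h0
      have hk0 : 0 < k := Nat.pos_of_ne_zero h0
      have hx : x = s.getD k pvSep := by
        by_contra hxx
        exact hc ⟨hk0, hxx⟩
      have hki : k < i := by
        have h' := hbrd
        rw [isBrdB, decide_eq_true_eq, hil] at h'
        exact h'.1
      exact hnx (by rw [hget k hki, hx])

-- one KMP step computes the longest proper border of the next prefix
lemma kmp_step (s : List Char) (pi : List Nat) (i : Nat) (h1 : 1 ≤ i) (hi : i < s.length)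
    (Hpi : ∀ m, m < i → pi.getD m 0 = lbp (s.take (m+1))) (k : Nat)
    (hk : k = lbp (s.take i)) :
    (let x := s.getD i pvSep
     let k1 := kmpWhile s pi x s.length k
     if x = s.getD k1 pvSep then k1 + 1 else k1) = lbp (s.take (i+1)) := by
  have hil : (s.take i).length = i := by rw [List.length_take]; omega
  have hget : ∀ j, j < i → (s.take i)[j]? = some (s.getD j pvSep) := by
    intro j hj
    rw [List.getElem?_take, if_pos hj, List.getD_eq_getElem?_getD,
        List.getElem?_eq_getElem (by omega)]
    rfl
  have hne : s.take i ≠ [] := by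
    apply List.ne_nil_of_length_pos; omega
  have hsucc : s.take (i+1) = s.take i ++ [s.getD i pvSep] := by
    rw [List.take_add_one, List.getElem?_eq_getElem hi]
    simp [List.getD_eq_getElem?_getD, List.getElem?_eq_getElem hi]
  set x := s.getD i pvSep with hx
  have hkfuel : k < s.length := by
    rw [hk]
    have := lbp_lt (s.take i) hne
    omega
  have hmax0 : ∀ j, isBrdB (s.take i) j = true → (s.take i)[j]? = some x → j ≤ k := by
    intro j hj _
    rw [hk]
    exact lbp_greatest _ _ hj
  obtain ⟨hb, hmax, hstop⟩ :=
    kmpWhile_run s pi x i (by omega) Hpi s.length k hkfuel (hk ▸ lbp_isBrd _ hne) hmax0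
  set r := kmpWhile s pi x s.length k with hr
  have hri : r < i := by
    have h' := hb
    rw [isBrdB, decide_eq_true_eq, hil] at h'
    exact h'.1
  show (if x = s.getD r pvSep then r + 1 else r) = _
  by_cases hmatch : x = s.getD r pvSep
  · rw [if_pos hmatch]
    have hrx : (s.take i)[r]? = some x := by rw [hget r hri, hmatch]
    symm
    rw [hsucc]
    apply lbp_eq_of
    · rw [brd_ext]
      exact ⟨hb, hrx⟩
    · intro K hK
      match K with
      | 0 => omega
      | (J+1) =>
        rw [brd_ext] at hK
        have := hmax J hK.1 hK.2
        omega
  · rw [if_neg hmatch]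
    have hr0 : r = 0 := by
      apply hstop
      intro hcon
      rw [hget r hri] at hcon
      exact hmatch (Option.some.injEq _ _ ▸ hcon).symm
    rw [hr0]
    symm
    rw [hsucc]
    apply lbp_eq_of
    · exact isBrdB_zero _ (by simp)
    · intro K hK
      match K with
      | 0 => omega
      | (J+1) =>
        rw [brd_ext] at hK
        exfalso
        have hJ0 : J = 0 := by have := hmax J hK.1 hK.2; omega
        rw [hJ0, hget 0 (by omega)] at hK
        rw [hr0] at hmatch
        exact hmatch (Option.some.injEq _ _ ▸ hK.2).symm

-- the fold invariant over range' 1 j: k is the longest proper border of the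
-- processed prefix, pi records all earlier ones
lemma kmpRun (s : List Char) (j : Nat) (hj : j + 1 ≤ s.length) :
    ((List.range' 1 j).foldl
      (fun st i =>
        let x := s.getD i pvSep
        let k1 := kmpWhile s st.1 x s.length st.2
        let k2 := if x = s.getD k1 pvSep then k1 + 1 else k1
        (st.1 ++ [k2], k2))
      ([0], 0)).2 = lbp (s.take (j+1)) ∧
    ((List.range' 1 j).foldl
      (fun st i =>
        let x := s.getD i pvSep
        let k1 := kmpWhile s st.1 x s.length st.2
        let k2 := if x = s.getD k1 pvSep then k1 + 1 else k1
        (st.1 ++ [k2], k2))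
      ([0], 0)).1.length = j + 1 ∧
    ∀ m, m < j + 1 →
      ((List.range' 1 j).foldl
        (fun st i =>
          let x := s.getD i pvSep
          let k1 := kmpWhile s st.1 x s.length st.2
          let k2 := if x = s.getD k1 pvSep then k1 + 1 else k1
          (st.1 ++ [k2], k2))
        ([0], 0)).1.getD m 0 = lbp (s.take (m+1)) := by
  have lbp_one : lbp (s.take 1) = 0 := by
    have hne : s.take 1 ≠ [] := by
      apply List.ne_nil_of_length_pos
      rw [List.length_take]; omega
    have := lbp_lt (s.take 1) hne
    rw [List.length_take] at this
    omega
  induction j with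
  | zero =>
    refine ⟨?_, rfl, ?_⟩
    · show (0 : Nat) = lbp (s.take 1)
      exact lbp_one.symm
    · intro m hm
      have : m = 0 := by omega
      subst this
      show (0 : Nat) = lbp (s.take 1)
      exact lbp_one.symm
  | succ j ih =>
    obtain ⟨ih1, ih2, ih3⟩ := ih (by omega)
    rw [List.range'_1_concat, List.foldl_append]
    set st := (List.range' 1 j).foldl
      (fun st i =>
        let x := s.getD i pvSep
        let k1 := kmpWhile s st.1 x s.length st.2
        let k2 := if x = s.getD k1 pvSep then k1 + 1 else k1
        (st.1 ++ [k2], k2))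
      ([0], 0) with hst
    have hstep := kmp_step s st.1 (j+1) (by omega) (by omega) ih3 st.2 ih1
    simp only [List.foldl_cons, List.foldl_nil]
    refine ⟨by rw [show (1+j) = j+1 by omega]; exact hstep, ?_, ?_⟩
    · simp [List.length_append, ih2]
    · intro m hm
      rcases Nat.lt_or_ge m (j+1) with h | h
      · show (st.1 ++ [_]).getD m 0 = _
        rw [List.getD_append _ _ _ _ (by omega)]
        exact ih3 m h
      · have hm' : m = j + 1 := by omega
        subst hm'
        show (st.1 ++ [_]).getD (j+1) 0 = _
        rw [List.getD_eq_getElem?_getD, List.getElem?_append_right (by omega), ih2]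
        simp only [Nat.sub_self, List.getElem?_cons_zero]
        rw [show (1+j) = j+1 by omega]
        simpa using hstep

-- the longest proper border of c ++ sep :: t is the largest overlap, when sep ∉ t
lemma lbp_sep (t c : List Char) (n : Nat) (ht : t.length = n) (hc : c.length = n)
    (hn : 1 ≤ n) (hT : ∀ ch ∈ t, ch ≠ pvSep) :
    lbp (c ++ pvSep :: t) =
      Nat.findGreatest (fun k => (decide (c.take k = t.drop (n - k))) = true) n := by
  set s := c ++ pvSep :: t with hs
  have hslen : s.length = 2*n + 1 := by
    rw [hs]; simp [List.length_append, ht, hc]; omega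
  have hsplit : s = (c ++ [pvSep]) ++ t := by rw [hs, List.append_cons]
  -- bridge: for K ≤ n, K is a border of s iff the overlap test holds
  have bridge : ∀ K, K ≤ n → (isBrdB s K = true ↔ c.take K = t.drop (n - K)) := by
    intro K hK
    rw [isBrdB, decide_eq_true_eq]
    have htake : s.take K = c.take K := by
      rw [hs, List.take_append_of_le_length (by omega)]
    have hdrop : s.drop (s.length - K) = t.drop (n - K) := by
      rw [show s.length - K = (c ++ [pvSep]).length + (n - K) by
        simp only [List.length_append, List.length_singleton, hc, hslen]; omega]
      rw [hsplit, List.drop_append]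
      simp
    constructor
    · rintro ⟨h1, h2⟩
      rw [List.suffix_iff_eq_drop, List.length_take,
          show min K s.length = K by omega, htake, hdrop] at h2
      exact h2
    · intro h
      refine ⟨by omega, ?_⟩
      rw [List.suffix_iff_eq_drop, List.length_take,
          show min K s.length = K by omega, htake, hdrop]
      exact h
  -- no border longer than n: the separator would have to occur inside t
  have nobig : ∀ K, isBrdB s K = true → K ≤ n := by
    intro K hK
    by_contra hbig
    rw [not_le] at hbig
    rw [isBrdB, decide_eq_true_eq] at hK
    obtain ⟨h1, h2⟩ := hK
    rw [List.suffix_iff_eq_drop, List.length_take,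
        show min K s.length = K by omega] at h2
    have hL : (s.take K)[n]? = some pvSep := by
      rw [List.getElem?_take, if_pos (by omega), hs,
          List.getElem?_append_right (by omega)]
      rw [hc, Nat.sub_self]
      rfl
    have hR : (s.drop (s.length - K))[n]? = t[2*n - K]? := by
      rw [List.getElem?_drop, hs, List.getElem?_append_right (by omega)]
      rw [show s.length - K + n - c.length = (2*n - K) + 1 by omega]
      rw [List.getElem?_cons_succ]
    rw [h2] at hL
    have hmem : pvSep ∈ t := List.mem_of_getElem? (by rw [← hR, hL])
    exact hT _ hmem rfl
  -- conclude via the characterization of lbp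
  have hP0 : (decide (c.take 0 = t.drop (n - 0))) = true := by
    simp [ht]
  have hPG := Nat.findGreatest_spec
    (P := fun k => (decide (c.take k = t.drop (n - k))) = true) (Nat.zero_le n) hP0
  have hGle := Nat.findGreatest_le
    (P := fun k => (decide (c.take k = t.drop (n - k))) = true) n
  apply lbp_eq_of
  · rw [bridge _ hGle]
    exact decide_eq_true_eq.mp hPG
  · intro K hK
    have hKn := nobig K hK
    exact Nat.le_findGreatest hKn (by rw [decide_eq_true_eq]; exact (bridge K hKn).mp hK)

-- A's per-character loop agrees pointwise (from the previous development)
lemma candLoop_iff (t c : String) (ov : Nat)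
    (hovt : ov ≤ t.toList.length) (hovc : ov ≤ c.toList.length) :
    ∀ (m i : Nat), i + m = ov →
      (candLoop t c ((ov : Int) - (i : Int)) (PySem.List.pyRange (i : Int) (ov : Int) 1) = true ↔
        ∀ j : Nat, i ≤ j → j < ov →
          t.toList[t.toList.length - ov + j]? = c.toList[j]?) := by
  intro m
  induction m with
  | zero =>
    intro i hi
    have : (ov : Int) ≤ (i : Int) := by omega
    rw [PySem.List.pyRange_one_eq_nil this]
    simp [candLoop]
    omega
  | succ m ih =>
    intro i hi
    have hilt : (i : Int) < (ov : Int) := by omega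
    rw [PySem.List.pyRange_one_cons hilt]
    have hk : (ov : Int) - (i : Int) = ((ov - i : Nat) : Int) := by omega
    have h1 : PySem.Str.pyGet? t (-((ov : Int) - (i : Int)))
        = t.toList[t.toList.length - (ov - i)]? := by
      rw [hk, PySem.Str.pyGet?_eq]
      exact PySem.List.pyGet?_neg_natCast t.toList (ov - i) (by omega) (by omega)
    have hidx : t.toList.length - (ov - i) = t.toList.length - ov + i := by omega
    have hlt : t.toList.length - ov + i < t.toList.length := by omega
    have hclt : i < c.toList.length := by omega
    have h1' : PySem.Str.pyGet? t (-((ov : Int) - (i : Int)))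
        = some t.toList[t.toList.length - ov + i] := by
      rw [h1, hidx, List.getElem?_eq_getElem hlt]
    have h2 : PySem.Str.pyGet? c (i : Int) = some c.toList[i] := by
      rw [PySem.Str.pyGet?_natCast, List.getElem?_eq_getElem hclt]
    have hrec : (ov : Int) - (i : Int) - 1 = (ov : Int) - ((i + 1 : Nat) : Int) := by
      push_cast; ring
    have hcast : ((i : Int) + 1) = ((i + 1 : Nat) : Int) := by push_cast; ring
    rw [show candLoop t c ((ov : Int) - (i : Int))
          ((i : Int) :: PySem.List.pyRange ((i : Int) + 1) (ov : Int) 1)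
        = match PySem.Str.pyGet? t (-((ov : Int) - (i : Int))), PySem.Str.pyGet? c (i : Int) with
          | some a, some b => if a ≠ b then false
              else candLoop t c ((ov : Int) - (i : Int) - 1) (PySem.List.pyRange ((i : Int) + 1) (ov : Int) 1)
          | _, _ => false from rfl]
    rw [h1', h2, hrec, hcast]
    show (if t.toList[t.toList.length - ov + i] ≠ c.toList[i] then false
          else candLoop t c ((ov : Int) - ((i + 1 : Nat) : Int))
            (PySem.List.pyRange ((i + 1 : Nat) : Int) (ov : Int) 1)) = true ↔ _
    by_cases heq : t.toList[t.toList.length - ov + i] = c.toList[i]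
    · rw [if_neg (not_not_intro heq)]
      rw [ih (i + 1) (by omega)]
      constructor
      · intro hall j hij hjov
        rcases Nat.eq_or_lt_of_le hij with h | h
        · subst h
          rw [List.getElem?_eq_getElem hlt, List.getElem?_eq_getElem hclt, heq]
        · exact hall j h hjov
      · intro hall j hij hjov
        exact hall j (by omega) hjov
    · rw [if_pos heq]
      constructor
      · intro hfalse; exact absurd hfalse (by simp)
      · intro hall
        exfalso
        have := hall i (le_refl i) (by omega)
        rw [List.getElem?_eq_getElem hlt, List.getElem?_eq_getElem hclt] at this
        exact heq (Option.some.injEq _ _ ▸ this)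

-- A's candidate test is the take/drop comparison
lemma cand_eq (t c : String) (h : t.toList.length = c.toList.length) (k : Nat)
    (_hk1 : 1 ≤ k) (hk2 : k ≤ t.toList.length) :
    candidateOverlapsTarget t c (k : Int)
      = decide (c.toList.take k = t.toList.drop (t.toList.length - k)) := by
  rw [Bool.eq_iff_iff, decide_eq_true_eq]
  unfold candidateOverlapsTarget
  have hc := candLoop_iff t c k hk2 (by omega) k 0 (by omega)
  simp only [Nat.cast_zero, sub_zero] at hc
  rw [hc]
  constructor
  · intro hall
    apply List.ext_getElem?
    intro j
    rw [List.getElem?_take, List.getElem?_drop]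
    by_cases hj : j < k
    · rw [if_pos hj]
      exact (hall j (Nat.zero_le _) hj).symm
    · rw [if_neg hj]
      symm
      apply List.getElem?_eq_none
      omega
  · intro hEq j _ hj
    have h2 := congrArg (fun l => l[j]?) hEq
    simp only [List.getElem?_take, List.getElem?_drop] at h2
    rw [if_pos hj] at h2
    exact h2.symm

-- A's keep-last fold is Nat.findGreatest
lemma fold_findGreatest (p' : Int → Bool) (P : Nat → Bool) (n : Nat)
    (h : ∀ k : Nat, 1 ≤ k → k ≤ n → p' (k : Int) = P k) :
    (PySem.List.pyRange 0 (n : Int) 1).foldl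
        (fun l i => if p' (i + 1) then i + 1 else l) 0
      = ((Nat.findGreatest (fun k => P k = true) n : Nat) : Int) := by
  induction n with
  | zero =>
    rw [Nat.cast_zero, PySem.List.pyRange_one_eq_nil (le_refl 0)]
    rfl
  | succ n ih =>
    have h1 : ((n + 1 : Nat) : Int) = (n : Int) + 1 := by push_cast; ring
    have hq : p' ((n : Int) + 1) = P (n + 1) := by
      rw [← h1]; exact h (n + 1) (by omega) (by omega)
    rw [h1, PySem.List.pyRange_one_succ_right (by positivity), List.foldl_append]
    simp only [List.foldl_cons, List.foldl_nil]
    rw [Nat.findGreatest_succ]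
    by_cases hp : P (n + 1) = true
    · rw [if_pos (by rw [hq]; exact hp), if_pos hp, h1]
    · rw [if_neg (by rw [hq]; exact hp), if_neg hp]
      exact ih (fun k hk1 hk2 => h k hk1 (by omega))

-- ===== VERDICT (by name: the statement is the Claim_ definition above) =====
theorem findLargestOverlap_spec : Claim_equal_findLargestOverlap := by
  intro t c hdom
  unfold Spec_findLargestOverlap findLargestOverlap findLargestOverlap_alt
      strandsAreEqualLengths strandsAreNotEmpty
  simp only [PySem.Str.len_eq]
  by_cases hlen : t.toList.length = c.toList.length
  · by_cases hemp : t.toList = []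
    · have hc0 : ((t.toList.length : Int)) = 0 := by rw [hemp]; rfl
      rw [if_neg (by rw [if_pos (Or.inl hemp), Bool.and_false]; exact Bool.false_ne_true)]
      rw [if_pos (Or.inr hc0)]
    · have hne : t.toList.length ≠ 0 := fun h0 => hemp (List.length_eq_zero_iff.mp h0)
      have hcemp : ¬ c.toList = [] := fun h => hne (by rw [hlen, h]; rfl)
      rw [if_pos (by
        rw [if_neg (by rintro (h | h); exacts [hemp h, hcemp h]), Bool.and_true]
        exact decide_eq_true (by exact_mod_cast hlen))]
      rw [if_neg (by omega)]
      -- A's fold is the greatest overlap length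
      rw [show ((c.toList.length : Int)) = ((t.toList.length : Int)) from by rw [hlen]]
      rw [fold_findGreatest (fun z => candidateOverlapsTarget t c z)
            (fun k => decide (c.toList.take k = t.toList.drop (t.toList.length - k)))
            t.toList.length
            (fun k hk1 hk2 => cand_eq t c hlen k hk1 hk2)]
      -- B's KMP pass computes the longest proper border of c ++ sep :: t
      have hT : ∀ ch ∈ t.toList, ch ≠ pvSep := by
        intro ch hm hEq
        have hd : pvDomStr t = true := by
          have := hdom
          rw [Dom_findLargestOverlap, Bool.and_eq_true] at this
          exact this.1
        rw [pvDomStr, List.all_eq_true] at hd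
        have := hd ch hm
        rw [hEq] at this
        exact absurd this (by decide)
      set st := c.toList ++ pvSep :: t.toList with hst
      have hstlen : 1 ≤ st.length := by
        rw [hst]; simp [List.length_append]; omega
      have hrun := (kmpRun st (st.length - 1) (by omega)).1
      rw [show st.length - 1 + 1 = st.length by omega, List.take_length] at hrun
      rw [kmpLoop, hrun]
      rw [lbp_sep t.toList c.toList t.toList.length rfl hlen.symm
            (by omega) hT]
  · rw [if_neg (by
      rw [Bool.and_eq_true]
      rintro ⟨hd, -⟩
      exact hlen (by exact_mod_cast of_decide_eq_true hd))]
    rw [if_pos (Or.inl (by omega))]
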